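-- pv_equiv track=rewrite | github.com/Leon0-0/FuncEvalGMN | GMN/handle_dataset/data_pre_processor/match_edge_processor.py | update_edges
-- ===== SOURCE A (Python) =====
-- def update_edges(edge, remove_node, edge_type):
--     remove_node_list = set(remove_node)
--     edge_new = []
--     edge_type_new = []
--
--     for i in range(len(edge)):
--         if edge[i][0] in remove_node_list or edge[i][1] in remove_node_list:
--             continue
--         else:
--             count1 = sum(1 for num in remove_node if edge[i][0] > num)
--             count2 = sum(1 for num in remove_node if edge[i][1] > num)
--             edge_new.append([edge[i][0] - count1, edge[i][1] - count2])
--             edge_type_new.append(edge_type[i])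
--
--     return edge_new, edge_type_new
-- ===== SOURCE B (Python) =====
-- def _bisect_left(a, x):
--     lo, hi = 0, len(a)
--     while lo < hi:
--         mid = (lo + hi) // 2
--         if a[mid] < x:
--             lo = mid + 1
--         else:
--             hi = mid
--     return lo
--
--
-- def update_edges(edge, remove_node, edge_type):
--     removed = set(remove_node)
--     srt = sorted(remove_node)
--     edge_new = []
--     edge_type_new = []
--     for pair, t in zip(edge, edge_type):
--         if pair[0] in removed or pair[1] in removed:
--             continue
--         edge_new.append([pair[0] - _bisect_left(srt, pair[0]),
--                          pair[1] - _bisect_left(srt, pair[1])])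
--         edge_type_new.append(t)
--     return edge_new, edge_type_new
-- ===== Notes on version B (the rewrite author's own statement) =====
-- stated objective: faster
-- what changed: Replaces the O(R) linear scan of remove_node per kept endpoint with one sort of remove_node plus a hand-written bisect_left (binary search) per endpoint, and iterates edges zipped with edge_type instead of indexing by range.
import Mathlib
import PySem

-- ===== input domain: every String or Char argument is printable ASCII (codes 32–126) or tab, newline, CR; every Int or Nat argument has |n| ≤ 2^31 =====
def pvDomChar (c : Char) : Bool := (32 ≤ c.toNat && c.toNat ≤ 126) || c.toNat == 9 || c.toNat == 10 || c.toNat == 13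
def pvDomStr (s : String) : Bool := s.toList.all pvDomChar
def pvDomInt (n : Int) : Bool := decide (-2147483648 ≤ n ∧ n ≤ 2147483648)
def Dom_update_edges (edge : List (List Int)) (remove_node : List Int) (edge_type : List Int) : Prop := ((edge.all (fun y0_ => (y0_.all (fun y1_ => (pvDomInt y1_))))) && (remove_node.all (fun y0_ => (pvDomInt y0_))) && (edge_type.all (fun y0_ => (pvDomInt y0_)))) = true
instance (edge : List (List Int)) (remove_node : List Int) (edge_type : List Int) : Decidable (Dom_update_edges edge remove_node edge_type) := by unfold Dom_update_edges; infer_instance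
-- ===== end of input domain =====

-- B sorts remove_node once and binary-searches (hand-written bisect_left) per kept endpoint instead of scanning remove_node per endpoint; return-value equivalence on Pre_ (inputs where A raises no IndexError).


-- ===== PORT A =====
def update_edges (edge : List (List Int)) (remove_node : List Int) (edge_type : List Int) : List (List Int) × List Int :=
  let remove_node_list : PySem.Set Int := PySem.Set.ofList remove_node
  (PySem.List.pyRange 0 (PySem.List.len edge) 1).foldl
    (fun (acc : List (List Int) × List Int) i =>
      if PySem.Set.contains remove_node_list (PySem.List.pyGetD (PySem.List.pyGetD edge i []) 0 0)
         || PySem.Set.contains remove_node_list (PySem.List.pyGetD (PySem.List.pyGetD edge i []) 1 0) then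
        acc
      else
        -- count1/count2: sum(1 for num in remove_node if edge[i][j] > num)
        let count1 : Int := ((remove_node.filter (fun num => decide (PySem.List.pyGetD (PySem.List.pyGetD edge i []) 0 0 > num))).map (fun _ => (1 : Int))).sum
        let count2 : Int := ((remove_node.filter (fun num => decide (PySem.List.pyGetD (PySem.List.pyGetD edge i []) 1 0 > num))).map (fun _ => (1 : Int))).sum
        (acc.1 ++ [[PySem.List.pyGetD (PySem.List.pyGetD edge i []) 0 0 - count1,
                    PySem.List.pyGetD (PySem.List.pyGetD edge i []) 1 0 - count2]],
         acc.2 ++ [PySem.List.pyGetD edge_type i 0]))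
    ([], [])

-- ===== PORT B =====
-- hand-written bisect_left of Source B: while lo < hi loop, mid = (lo+hi)//2 (lo, hi stay ≥ 0, so Nat // matches Python's //)
def pyBisectLeft (a : List Int) (x : Int) (lo hi : Nat) : Nat :=
  if h : lo < hi then
    if PySem.List.pyGetD a (((lo + hi) / 2 : Nat) : Int) 0 < x then
      pyBisectLeft a x ((lo + hi) / 2 + 1) hi
    else
      pyBisectLeft a x lo ((lo + hi) / 2)
  else lo
termination_by hi - lo
decreasing_by all_goals omega

def update_edges_alt (edge : List (List Int)) (remove_node : List Int) (edge_type : List Int) : List (List Int) × List Int :=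
  let removed : PySem.Set Int := PySem.Set.ofList remove_node
  let srt := PySem.List.sorted remove_node (fun y => y) false
  (edge.zip edge_type).foldl
    (fun (acc : List (List Int) × List Int) pt =>
      if PySem.Set.contains removed (PySem.List.pyGetD pt.1 0 0)
         || PySem.Set.contains removed (PySem.List.pyGetD pt.1 1 0) then
        acc
      else
        (acc.1 ++ [[PySem.List.pyGetD pt.1 0 0 - (pyBisectLeft srt (PySem.List.pyGetD pt.1 0 0) 0 srt.length : Int),
                    PySem.List.pyGetD pt.1 1 0 - (pyBisectLeft srt (PySem.List.pyGetD pt.1 1 0) 0 srt.length : Int)]],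
         acc.2 ++ [pt.2]))
    ([], [])

-- ===== PRECONDITION & SPEC =====
-- Pre_ is exactly where A raises no IndexError: each row must be nonempty; if its first entry is not removed it
-- must have a second entry; if neither entry is removed the row's index must be inside edge_type.
def Pre_update_edges (edge : List (List Int)) (remove_node : List Int) (edge_type : List Int) : Prop :=
  ∀ p ∈ PySem.List.enumerate edge 0,
    p.2 ≠ [] ∧ (p.2.getD 0 0 ∈ remove_node ∨
      (2 ≤ p.2.length ∧ (p.2.getD 1 0 ∈ remove_node ∨ p.1 < (edge_type.length : Int))))
instance (edge : List (List Int)) (remove_node : List Int) (edge_type : List Int) : Decidable (Pre_update_edges edge remove_node edge_type) := by unfold Pre_update_edges; infer_instance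

def pvWitness_update_edges : List (List Int) × List Int × List Int := ([[0, 1], [2, 3]], [2], [7, 8])

def Spec_update_edges (edge : List (List Int)) (remove_node : List Int) (edge_type : List Int) (out : List (List Int) × List Int) : Prop := out = update_edges_alt edge remove_node edge_type
instance (edge : List (List Int)) (remove_node : List Int) (edge_type : List Int) (out : List (List Int) × List Int) : Decidable (Spec_update_edges edge remove_node edge_type out) := by unfold Spec_update_edges; infer_instance

-- ===== CLAIM (what is proved, stated in full; the proofs are below) =====
def Claim_equal_update_edges : Prop := ∀ (edge : List (List Int)) (remove_node : List Int) (edge_type : List Int), Dom_update_edges edge remove_node edge_type → Pre_update_edges edge remove_node edge_type → Spec_update_edges edge remove_node edge_type (update_edges edge remove_node edge_type)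

-- ===== LEMMAS AND PROOFS =====

-- proof-side shorthands
def pvSkip (rn : List Int) (row : List Int) : Bool :=
  PySem.Set.contains (PySem.Set.ofList rn) (PySem.List.pyGetD row 0 0)
    || PySem.Set.contains (PySem.Set.ofList rn) (PySem.List.pyGetD row 1 0)

def pvCnt (rn : List Int) (x : Int) : Nat := rn.countP (fun num => decide (x > num))

def pvF (rn : List Int) (row : List Int) : List Int :=
  [PySem.List.pyGetD row 0 0 - (pvCnt rn (PySem.List.pyGetD row 0 0) : Int),
   PySem.List.pyGetD row 1 0 - (pvCnt rn (PySem.List.pyGetD row 1 0) : Int)]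

def pvHA (rn et : List Int) (acc : List (List Int) × List Int) (p : Int × List Int) : List (List Int) × List Int :=
  if pvSkip rn p.2 then acc
  else (acc.1 ++ [pvF rn p.2], acc.2 ++ [PySem.List.pyGetD et p.1 0])

def pvG (rn : List Int) (acc : List (List Int) × List Int) (pt : List Int × Int) : List (List Int) × List Int :=
  if pvSkip rn pt.1 then acc
  else (acc.1 ++ [pvF rn pt.1], acc.2 ++ [pt.2])

def pvQ (rn et : List Int) (p : Int × List Int) : Prop :=
  p.2 ≠ [] ∧ (p.2.getD 0 0 ∈ rn ∨
    (2 ≤ p.2.length ∧ (p.2.getD 1 0 ∈ rn ∨ p.1 < (et.length : Int))))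

lemma pv_get1 (row : List Int) :
    PySem.List.pyGetD row 1 0 = row.getD 1 0 := by
  rw [show ((1:Int)) = ((1:Nat):Int) by norm_num, PySem.List.pyGetD_natCast]

lemma pv_skip_true (rn : List Int) (row : List Int)
    (h : row.getD 0 0 ∈ rn ∨ row.getD 1 0 ∈ rn) : pvSkip rn row = true := by
  unfold pvSkip
  rcases h with h | h
  · simp only [PySem.List.pyGetD_zero, Bool.or_eq_true]
    exact Or.inl (by simpa [PySem.Set.mem_ofList] using h)
  · simp only [pv_get1 row, Bool.or_eq_true]
    exact Or.inr (by simpa [PySem.Set.mem_ofList] using h)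

lemma pv_skip_false (rn : List Int) (row : List Int)
    (h : pvSkip rn row = false) : row.getD 0 0 ∉ rn ∧ row.getD 1 0 ∉ rn := by
  unfold pvSkip at h
  simp only [Bool.or_eq_false_iff] at h
  constructor
  · intro hm
    have := pv_skip_true rn row (Or.inl hm)
    unfold pvSkip at this
    rw [h.1, h.2] at this
    simp at this
  · intro hm
    have := pv_skip_true rn row (Or.inr hm)
    unfold pvSkip at this
    rw [h.1, h.2] at this
    simp at this

lemma pv_bl_iff (s : List Int) (x : Int) (hs : s.Pairwise (· ≤ ·)) :
    ∀ (n lo hi : Nat), hi - lo ≤ n → lo ≤ hi → hi ≤ s.length →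
      (∀ (k : Nat) (hk : k < s.length), k < lo → s[k] < x) →
      (∀ (k : Nat) (hk : k < s.length), hi ≤ k → ¬ s[k] < x) →
      lo ≤ pyBisectLeft s x lo hi ∧ pyBisectLeft s x lo hi ≤ hi ∧
        ∀ (k : Nat) (hk : k < s.length), (s[k] < x ↔ k < pyBisectLeft s x lo hi) := by
  have hmono := List.pairwise_iff_getElem.1 hs
  intro n
  induction n with
  | zero =>
    intro lo hi hn hle hhi hlo hhi'
    have heq : lo = hi := by omega
    rw [pyBisectLeft]
    simp only [heq, lt_irrefl, dif_neg, not_false_iff]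
    refine ⟨by omega, by omega, fun k hk => ?_⟩
    constructor
    · intro hlt
      by_contra hge
      exact hhi' k hk (by omega) hlt
    · intro hk'
      exact hlo k hk (by omega)
  | succ m ih =>
    intro lo hi hn hle hhi hlo' hhi'
    by_cases hlh : lo < hi
    · rw [pyBisectLeft]
      rw [dif_pos hlh]
      have hmid1 : lo ≤ (lo + hi) / 2 := by omega
      have hmid2 : (lo + hi) / 2 < hi := by omega
      have hmlen : (lo + hi) / 2 < s.length := by omega
      have hget : PySem.List.pyGetD s (((lo + hi) / 2 : Nat) : Int) 0 = s[(lo + hi) / 2] := by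
        rw [PySem.List.pyGetD_natCast]
        exact List.getD_eq_getElem _ _ hmlen
      by_cases hc : s[(lo + hi) / 2] < x
      · rw [if_pos (by rw [hget]; exact hc)]
        have := ih ((lo + hi) / 2 + 1) hi (by omega) (by omega) hhi
          (fun k hk hklt => by
            rcases Nat.lt_or_ge k ((lo + hi) / 2) with h1 | h1
            · exact lt_of_le_of_lt ((hmono k ((lo+hi)/2) hk hmlen h1)) hc
            · have : k = (lo + hi) / 2 := by omega
              subst this; exact hc)
          hhi'
        exact ⟨by omega, this.2.1, this.2.2⟩
      · rw [if_neg (by rw [hget]; exact hc)]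
        have := ih lo ((lo + hi) / 2) (by omega) (by omega) (by omega) hlo'
          (fun k hk hkge => fun hlt => by
            rcases Nat.lt_or_ge ((lo + hi) / 2) k with h1 | h1
            · exact hc (lt_of_le_of_lt (hmono ((lo+hi)/2) k hmlen hk h1) hlt)
            · have : k = (lo + hi) / 2 := by omega
              subst this; exact hc hlt)
        exact ⟨this.1, by omega, this.2.2⟩
    · rw [pyBisectLeft, dif_neg hlh]
      have heq : lo = hi := by omega
      refine ⟨le_refl _, by omega, fun k hk => ?_⟩
      constructor
      · intro hlt
        by_contra hge
        exact hhi' k hk (by omega) hlt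
      · intro hk'
        exact hlo' k hk hk'

lemma pv_countP_of_iff (s : List Int) (x : Int) (r : Nat) (hr : r ≤ s.length)
    (h : ∀ (k : Nat) (hk : k < s.length), (s[k] < x ↔ k < r)) :
    s.countP (fun y => decide (y < x)) = r := by
  conv_lhs => rw [← List.take_append_drop r s]
  rw [List.countP_append]
  have h1 : (s.take r).countP (fun y => decide (y < x)) = r := by
    rw [List.countP_eq_length_filter, List.filter_eq_self.2, List.length_take]
    · omega
    · intro y hy
      obtain ⟨i, hi, rfl⟩ := List.mem_iff_getElem.1 hy
      rw [List.getElem_take]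
      simp only [List.length_take] at hi
      exact decide_eq_true ((h i (by omega)).2 (by omega))
  have h2 : (s.drop r).countP (fun y => decide (y < x)) = 0 := by
    rw [List.countP_eq_zero]
    intro y hy
    obtain ⟨i, hi, rfl⟩ := List.mem_iff_getElem.1 hy
    rw [List.getElem_drop]
    simp only [List.length_drop] at hi
    intro hc
    simp only [decide_eq_true_eq] at hc
    exact absurd ((h (r + i) (by omega)).1 hc) (by omega)
  rw [h1, h2]
  omega

lemma pv_bl_eq (rn : List Int) (x : Int) :
    pyBisectLeft (PySem.List.sorted rn (fun y => y) false) x 0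
        (PySem.List.sorted rn (fun y => y) false).length = pvCnt rn x := by
  set s := PySem.List.sorted rn (fun y => y) false with hsdef
  have hs : s.Pairwise (· ≤ ·) := by
    have := PySem.List.sorted_pairwise (xs := rn) (key := fun y => y) (κ := Int)
    simpa [hsdef] using this
  have h := pv_bl_iff s x hs s.length 0 s.length (by omega) (by omega) (le_refl _)
    (fun k hk hklt => absurd hklt (by omega))
    (fun k hk hge => absurd hk (by omega))
  have hc := pv_countP_of_iff s x _ h.2.1 h.2.2
  have hperm : s.Perm rn := PySem.List.sorted_perm rn (fun y => y) false
  rw [← hc, hperm.countP_eq]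
  unfold pvCnt
  apply List.countP_congr
  intro a _
  simp [gt_iff_lt]

lemma pv_foldl_skip (rn et : List Int) (e : List (List Int)) :
    ∀ (j : Nat) (acc : List (List Int) × List Int),
      (∀ p ∈ PySem.List.enumerate e (j : Int), pvQ rn et p) → et.length ≤ j →
      (PySem.List.enumerate e (j : Int)).foldl (pvHA rn et) acc = acc := by
  induction e with
  | nil => intro j acc _ _; simp [PySem.List.enumerate_nil]
  | cons row rest ih =>
    intro j acc hq hj
    rw [PySem.List.enumerate_cons]
    have hq0 := hq ((j : Int), row) (by rw [PySem.List.enumerate_cons]; exact List.mem_cons_self ..)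
    obtain ⟨hne, hcase⟩ := hq0
    have hskip : pvSkip rn row = true := by
      apply pv_skip_true
      rcases hcase with h | ⟨h2, h | h⟩
      · exact Or.inl h
      · exact Or.inr h
      · exfalso; simp at h; omega
    rw [List.foldl_cons]
    have : pvHA rn et acc ((j : Int), row) = acc := by
      unfold pvHA; rw [hskip]; simp
    rw [this]
    have hcast : ((j : Int) + 1) = ((j + 1 : Nat) : Int) := by push_cast; ring
    rw [hcast]
    apply ih (j + 1) acc _ (by omega)
    intro p hp
    exact hq p (by rw [PySem.List.enumerate_cons, hcast]; exact List.mem_cons_of_mem _ hp)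

lemma pv_loop_eq (rn et : List Int) :
    ∀ (e : List (List Int)) (j : Nat) (acc : List (List Int) × List Int),
      (∀ p ∈ PySem.List.enumerate e (j : Int), pvQ rn et p) →
      (PySem.List.enumerate e (j : Int)).foldl (pvHA rn et) acc
        = (e.zip (et.drop j)).foldl (pvG rn) acc := by
  intro e
  induction e with
  | nil => intro j acc _; simp [PySem.List.enumerate_nil]
  | cons row rest ih =>
    intro j acc hq
    rw [PySem.List.enumerate_cons, List.foldl_cons]
    have hcast : ((j : Int) + 1) = ((j + 1 : Nat) : Int) := by push_cast; ring
    have hqrest : ∀ p ∈ PySem.List.enumerate rest ((j + 1 : Nat) : Int), pvQ rn et p := by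
      intro p hp
      exact hq p (by rw [PySem.List.enumerate_cons, hcast]; exact List.mem_cons_of_mem _ hp)
    have hq0 := hq ((j : Int), row) (by rw [PySem.List.enumerate_cons]; exact List.mem_cons_self ..)
    obtain ⟨hne, hcase⟩ := hq0
    by_cases hskip : pvSkip rn row = true
    · have hstep : pvHA rn et acc ((j : Int), row) = acc := by
        unfold pvHA; rw [hskip]; simp
      rw [hstep, hcast]
      rcases Nat.lt_or_ge j et.length with hjlt | hjge
      · rw [List.drop_eq_getElem_cons hjlt, List.zip_cons_cons, List.foldl_cons]
        have hstep2 : pvG rn acc (row, et[j]) = acc := by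
          unfold pvG; rw [hskip]; simp
        rw [hstep2]
        exact ih (j + 1) acc hqrest
      · rw [List.drop_eq_nil_of_le hjge]
        simp only [List.zip_nil_right, List.foldl_nil]
        have : et.drop (j+1) = [] := List.drop_eq_nil_of_le (by omega)
        rw [pv_foldl_skip rn et rest (j+1) acc hqrest (by omega)]
    · have hskipf : pvSkip rn row = false := by simpa using hskip
      have h2 : 2 ≤ row.length := by
        rcases hcase with h | ⟨h2, _⟩
        · exfalso
          exact absurd (pv_skip_true rn row (Or.inl h)) (by simp [hskipf])
        · exact h2
      have hnm := pv_skip_false rn row hskipf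
      have hjlt : j < et.length := by
        rcases hcase with h | ⟨_, h | h⟩
        · exact absurd h hnm.1
        · exact absurd h hnm.2
        · simpa using h
      rw [List.drop_eq_getElem_cons hjlt, List.zip_cons_cons, List.foldl_cons]
      have hstep : pvHA rn et acc ((j : Int), row)
          = (acc.1 ++ [pvF rn row], acc.2 ++ [et[j]]) := by
        unfold pvHA
        rw [hskipf]
        simp only [Bool.false_eq_true, if_false]
        rw [PySem.List.pyGetD_natCast, List.getD_eq_getElem _ _ hjlt]
      have hG : pvG rn acc (row, et[j]) = (acc.1 ++ [pvF rn row], acc.2 ++ [et[j]]) := by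
        simp [pvG, hskipf]
      rw [hstep, hG, hcast]
      exact ih (j + 1) _ hqrest

lemma pv_sum_ones (l : List Int) (p : Int → Bool) :
    ((l.filter p).map (fun _ => (1 : Int))).sum = (l.countP p : Int) := by
  simp [List.map_const', List.sum_replicate, List.countP_eq_length_filter]

lemma pv_A_eq (e : List (List Int)) (rn et : List Int) :
    update_edges e rn et = (PySem.List.enumerate e 0).foldl (pvHA rn et) ([], []) := by
  unfold update_edges
  dsimp only
  rw [PySem.List.enumerate_eq_map_pyRange (d := ([] : List Int)), List.foldl_map]
  congr 1
  funext acc i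
  simp only [pvHA, pvSkip, pvF, pvCnt, pv_sum_ones]

lemma pv_B_eq (e : List (List Int)) (rn et : List Int) :
    update_edges_alt e rn et = (e.zip et).foldl (pvG rn) ([], []) := by
  unfold update_edges_alt
  dsimp only
  congr 1
  funext acc pt
  simp only [pvG, pvSkip, pvF, pv_bl_eq]

-- ===== VERDICT (by name: the statement is the Claim_ definition above) =====
theorem update_edges_spec : Claim_equal_update_edges := by
  intro e rn et _hdom hpre
  unfold Spec_update_edges
  rw [pv_A_eq, pv_B_eq]
  have := pv_loop_eq rn et e 0 ([], []) (by
    intro p hp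
    exact hpre p (by simpa using hp))
  simpa using this
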